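-- pv_equiv track=rewrite | github.com/rjsicko/pyvariant | ensembl_map/utils.py | collapse_mutation_ends
-- ===== SOURCE A (Python) =====
-- from typing import Iterator, List, Optional, Tuple
--
-- def collapse_mutation_ends(refseq: str, altseq: str) -> Tuple[str, str, str, str]:
--     """Compare two strings (ref and alt) and split each at the point where the two sequences are no
--     longer the same when read from one end or the other (determined by `idx` being either 0 or -1).
--
--     For example, 'AATTTC' and 'AAGC' both start with 'AA' and end with 'C'
--
--     Examples:
--         >>> _split_at_common_substring('AATTTC', 'AAGC') == ('TTT', 'G', 'AA', 'C')
--     """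
--     common_left: List[str] = list()
--     common_right: List[str] = list()
--     refseq_ = list(refseq)
--     altseq_ = list(altseq)
--
--     def trim_one_side(idx: int, common: List):
--         assert idx in (0, -1)
--
--         while True:
--             try:
--                 i = refseq_.pop(idx)
--             except IndexError:
--                 i = ""
--
--             try:
--                 j = altseq_.pop(idx)
--             except IndexError:
--                 j = ""
--
--             if i != j or not i or not j:
--                 # Put the 'popped' bases back then stop
--                 if i:
--                     if idx == 0:
--                         refseq_.insert(0, i)
--                     elif idx == -1:
--                         refseq_.append(i)
--                 if j:
--                     if idx == 0:
--                         altseq_.insert(0, j)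
--                     elif idx == -1:
--                         altseq_.append(j)
--                 break
--             else:
--                 if idx == 0:
--                     common.append(i)
--                 elif idx == -1:
--                     common.insert(0, i)
--
--     trim_one_side(0, common_left)  # Trim 5' (left) end
--     trim_one_side(-1, common_right)  # Trim 3' (right) end
--
--     return "".join(refseq_), "".join(altseq_), "".join(common_left), "".join(common_right)
-- ===== SOURCE B (Python) =====
-- def collapse_mutation_ends(refseq: str, altseq: str):
--     """Linear two-pointer scan: longest common prefix, then longest common
--     suffix of the remainders, instead of repeated list pop/insert."""
--     p = 0
--     for x, y in zip(refseq, altseq):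
--         if x != y:
--             break
--         p += 1
--     r, a = refseq[p:], altseq[p:]
--     s = 0
--     for x, y in zip(reversed(r), reversed(a)):
--         if x != y:
--             break
--         s += 1
--     return (r[:len(r) - s], a[:len(a) - s], refseq[:p], r[len(r) - s:])
-- ===== Notes on version B (the rewrite author's own statement) =====
-- stated objective: faster
-- what changed: Replaces the pop(0)/insert(0) list-mutation loops (each O(n) per step) with a linear two-pointer scan: longest common prefix length, then longest common suffix of the remainders, and slicing.
import Mathlib
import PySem

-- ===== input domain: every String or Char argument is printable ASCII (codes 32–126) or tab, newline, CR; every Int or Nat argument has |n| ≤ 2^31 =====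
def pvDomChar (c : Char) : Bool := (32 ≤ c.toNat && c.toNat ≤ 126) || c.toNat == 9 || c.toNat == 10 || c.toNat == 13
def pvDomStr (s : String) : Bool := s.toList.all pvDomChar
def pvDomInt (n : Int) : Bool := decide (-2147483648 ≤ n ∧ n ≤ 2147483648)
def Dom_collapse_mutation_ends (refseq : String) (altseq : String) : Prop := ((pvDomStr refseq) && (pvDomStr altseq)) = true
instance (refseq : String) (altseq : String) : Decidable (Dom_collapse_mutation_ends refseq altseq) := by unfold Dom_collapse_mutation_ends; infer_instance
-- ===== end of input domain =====

-- B replaces A's quadratic pop(0)/insert(0) mutation loops with a linear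
-- two-pointer prefix/suffix scan plus slicing (objective: faster).


-- ===== PORT A =====
-- trim_one_side(0, common): pop heads; on mismatch/exhaustion put them back
-- (cons) and stop; else append the char to common and continue.
def pvTrimLeft : List Char → List Char → List Char × List Char × List Char
  | i :: r, j :: a =>
    if i = j then
      let (r', a', c) := pvTrimLeft r a
      (r', a', i :: c)
    else (i :: r, j :: a, [])
  | r, a => (r, a, [])

-- trim_one_side(-1, common): pop last elements; on mismatch/exhaustion put
-- them back (append) and stop; else insert the char at the front of common
-- (here: recurse on dropLast, then append the char at the end).
def pvTrimRight (r a : List Char) : List Char × List Char × List Char :=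
  match hr : r.getLast?, ha : a.getLast? with
  | some i, some j =>
    if i = j then
      let (r', a', c) := pvTrimRight r.dropLast a.dropLast
      (r', a', c ++ [i])
    else (r, a, [])
  | _, _ => (r, a, [])
termination_by r.length
decreasing_by
  have hne : r ≠ [] := by intro h; subst h; simp at hr
  have : 0 < r.length := List.length_pos_of_ne_nil hne
  simp only [List.length_dropLast]
  omega

def collapse_mutation_ends (refseq : String) (altseq : String) : List String :=
  let (r1, a1, cl) := pvTrimLeft refseq.toList altseq.toList
  let (r2, a2, cr) := pvTrimRight r1 a1
  [String.ofList r2, String.ofList a2, String.ofList cl, String.ofList cr]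

-- ===== PORT B =====
-- the `for x, y in zip(...): if x != y: break; k += 1` counter of Source B
def pvPfxLen : List Char → List Char → Nat
  | x :: xs, y :: ys => if x ≠ y then 0 else pvPfxLen xs ys + 1
  | _, _ => 0

def collapse_mutation_ends_alt (refseq : String) (altseq : String) : List String :=
  let R := refseq.toList
  let A := altseq.toList
  let p := pvPfxLen R A
  let r := R.drop p
  let a := A.drop p
  let s := pvPfxLen r.reverse a.reverse
  [String.ofList (r.take (r.length - s)), String.ofList (a.take (a.length - s)),
   String.ofList (R.take p), String.ofList (r.drop (r.length - s))]

-- ===== PRECONDITION & SPEC =====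
def Spec_collapse_mutation_ends (refseq : String) (altseq : String) (out : List String) : Prop := out = collapse_mutation_ends_alt refseq altseq
instance (refseq : String) (altseq : String) (out : List String) : Decidable (Spec_collapse_mutation_ends refseq altseq out) := by unfold Spec_collapse_mutation_ends; infer_instance

-- ===== CLAIM (what is proved, stated in full; the proofs are below) =====
def Claim_equal_collapse_mutation_ends : Prop := ∀ (refseq : String) (altseq : String), Dom_collapse_mutation_ends refseq altseq → Spec_collapse_mutation_ends refseq altseq (collapse_mutation_ends refseq altseq)

-- ===== LEMMAS AND PROOFS =====

theorem pvTrimLeft_eq (r a : List Char) :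
    pvTrimLeft r a = (r.drop (pvPfxLen r a), a.drop (pvPfxLen r a), r.take (pvPfxLen r a)) := by
  induction r generalizing a with
  | nil => cases a <;> simp [pvTrimLeft, pvPfxLen]
  | cons x xs ih =>
    cases a with
    | nil => simp [pvTrimLeft, pvPfxLen]
    | cons y ys =>
      by_cases h : x = y
      · subst h
        simp [pvTrimLeft, pvPfxLen, ih ys]
      · simp [pvTrimLeft, pvPfxLen, h]

theorem pvTrimRight_rev (rr ar : List Char) :
    pvTrimRight rr.reverse ar.reverse =
      ((pvTrimLeft rr ar).1.reverse, (pvTrimLeft rr ar).2.1.reverse, (pvTrimLeft rr ar).2.2.reverse) := by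
  induction rr generalizing ar with
  | nil =>
    rw [pvTrimRight.eq_def]
    cases ar <;> simp [pvTrimLeft]
  | cons x xs ih =>
    cases ar with
    | nil =>
      rw [pvTrimRight.eq_def]
      simp [pvTrimLeft]
    | cons y ys =>
      rw [pvTrimRight.eq_def]
      split
      · rename_i i j hr ha
        simp only [List.getLast?_reverse, List.head?_cons, Option.some.injEq] at hr ha
        subst hr; subst ha
        by_cases h : x = y
        · subst h
          simp [ih ys, pvTrimLeft]
        · simp [h, pvTrimLeft]
      · rename_i hno
        exact absurd (hno x y (by simp) (by simp)) (by simp)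

theorem pvTrimRight_eq (r a : List Char) :
    pvTrimRight r a =
      (r.take (r.length - pvPfxLen r.reverse a.reverse),
       a.take (a.length - pvPfxLen r.reverse a.reverse),
       r.drop (r.length - pvPfxLen r.reverse a.reverse)) := by
  conv_lhs => rw [← List.reverse_reverse r, ← List.reverse_reverse a]
  rw [pvTrimRight_rev, pvTrimLeft_eq]
  simp only [List.drop_reverse, List.take_reverse, List.reverse_reverse]

-- ===== VERDICT (by name: the statement is the Claim_ definition above) =====
theorem collapse_mutation_ends_spec : Claim_equal_collapse_mutation_ends := by
  intro refseq altseq _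
  unfold Spec_collapse_mutation_ends collapse_mutation_ends collapse_mutation_ends_alt
  simp only [pvTrimLeft_eq, pvTrimRight_eq]
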